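-- pv_equiv track=rewrite | github.com/benpayne/wordle_bot | word_work.py | number_to_result
-- ===== SOURCE A (Python) =====
-- def number_to_result(num):
--     result = []
--     for i in range(5):
--         if num % 3 == 2:
--             result.append('correct')
--         elif num % 3 == 1:
--             result.append('present')
--         else:
--             result.append('absent')
--         num //= 3
--     return result
-- ===== SOURCE B (Python) =====
-- def number_to_result(num):
--     labels = ['absent', 'present', 'correct']
--     table = [[a, b, c, d, e]
--              for e in labels for d in labels for c in labels
--              for b in labels for a in labels]
--     return table[num % 243]
-- ===== Notes on version B (the rewrite author's own statement) =====
-- stated objective: alternative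
-- what changed: Replaces the per-call digit loop (repeated floor-division feeding an if/elif cascade) by a table of every possible five-label outcome, built once via a nested comprehension over the label alphabet, plus a single modular indexed lookup.
import Mathlib
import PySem

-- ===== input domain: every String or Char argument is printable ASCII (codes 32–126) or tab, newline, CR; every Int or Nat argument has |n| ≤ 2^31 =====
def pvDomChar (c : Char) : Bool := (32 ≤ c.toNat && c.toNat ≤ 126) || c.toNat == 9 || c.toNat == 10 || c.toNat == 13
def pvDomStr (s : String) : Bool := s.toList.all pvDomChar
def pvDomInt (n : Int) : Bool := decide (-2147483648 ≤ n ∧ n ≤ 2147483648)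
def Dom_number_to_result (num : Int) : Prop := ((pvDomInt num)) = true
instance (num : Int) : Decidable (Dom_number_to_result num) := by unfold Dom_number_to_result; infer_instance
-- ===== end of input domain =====

-- B replaces A's per-call base-3 digit loop by a precomputed lookup table of all
-- 243 possible label lists, indexed once by num % 243 (alternative decomposition).


-- ===== PORT A =====
def number_to_result (num : Int) : List String :=
  (((PySem.List.pyRange 0 5 1).foldl (fun (st : List String × Int) (_i : Int) =>
      (if PySem.Int.mod st.2 3 = 2 then st.1 ++ ["correct"]
       else if PySem.Int.mod st.2 3 = 1 then st.1 ++ ["present"]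
       else st.1 ++ ["absent"],
       PySem.Int.floordiv st.2 3)) ([], num))).1

-- ===== PORT B =====
def pvLabels : List String := ["absent", "present", "correct"]

-- the nested list comprehension building all 243 outcomes (comprehension = flatMap/map)
def pvTable : List (List String) :=
  pvLabels.flatMap (fun e => pvLabels.flatMap (fun d => pvLabels.flatMap (fun c =>
    pvLabels.flatMap (fun b => pvLabels.map (fun a => [a, b, c, d, e])))))

-- table[num % 243]: the index is always in range (0 ≤ num % 243 < 243 = length), so pyGet? is some
def number_to_result_alt (num : Int) : List String :=
  (PySem.List.pyGet? pvTable (PySem.Int.mod num 243)).getD []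

-- ===== PRECONDITION & SPEC =====
def Spec_number_to_result (num : Int) (out : List String) : Prop := out = number_to_result_alt num
instance (num : Int) (out : List String) : Decidable (Spec_number_to_result num out) := by unfold Spec_number_to_result; infer_instance

-- ===== CLAIM (what is proved, stated in full; the proofs are below) =====
def Claim_equal_number_to_result : Prop := ∀ (num : Int), Dom_number_to_result num → Spec_number_to_result num (number_to_result num)

-- ===== LEMMAS AND PROOFS =====

-- A's value depends only on num modulo 243: each of the five digits it inspects does
theorem pv_A_mod (num : Int) : number_to_result num = number_to_result (num % 243) := by
  have hr : PySem.List.pyRange 0 5 1 = [0, 1, 2, 3, 4] := by decide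
  simp only [number_to_result, hr, List.foldl]
  simp only [PySem.Int.mod_eq_emod_of_pos (show (0:Int) < 3 by omega),
    PySem.Int.floordiv_eq_ediv_of_pos (show (0:Int) < 3 by omega)]
  have h0 : num % 3 = (num % 243) % 3 := by omega
  have h1 : (num / 3) % 3 = ((num % 243) / 3) % 3 := by omega
  have h2 : (num / 3 / 3) % 3 = ((num % 243) / 3 / 3) % 3 := by omega
  have h3 : (num / 3 / 3 / 3) % 3 = ((num % 243) / 3 / 3 / 3) % 3 := by omega
  have h4 : (num / 3 / 3 / 3 / 3) % 3 = ((num % 243) / 3 / 3 / 3 / 3) % 3 := by omega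
  rw [h0, h1, h2, h3, h4]

-- B's value depends only on num modulo 243 (it reads nothing else)
theorem pv_B_mod (num : Int) : number_to_result_alt num = number_to_result_alt (num % 243) := by
  simp only [number_to_result_alt, PySem.Int.mod_eq_emod_of_pos (show (0:Int) < 243 by omega)]
  have h : num % 243 % 243 = num % 243 := by omega
  rw [h]

-- A = B on every residue 0 ≤ r < 243, checked exhaustively
set_option maxRecDepth 40000 in
theorem pv_fin : ∀ f : Fin 243, number_to_result (f : Int) = number_to_result_alt (f : Int) := by
  decide

-- ===== VERDICT (by name: the statement is the Claim_ definition above) =====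
theorem number_to_result_spec : Claim_equal_number_to_result := by
  intro num _
  show _ = _
  rw [pv_A_mod, pv_B_mod]
  have hlt : (num % 243).toNat < 243 := by omega
  have hc : ((⟨(num % 243).toNat, hlt⟩ : Fin 243) : Int) = num % 243 := by
    show ((num % 243).toNat : Int) = num % 243
    omega
  have := pv_fin ⟨(num % 243).toNat, hlt⟩
  rwa [hc] at this
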